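-- pv_equiv track=rewrite | github.com/eeyrw/midi-to-simplescore | MidiToSimpleScore.py | analyzeNoteList
-- ===== SOURCE A (Python) =====
-- from functools import reduce
--
-- def analyzeNoteList(noteOnList):
--     noteOccurtimeList = [0]*128
--     noteOnListWithoutEndTag = noteOnList[:-1]
--     for _, note in noteOnListWithoutEndTag:
--         noteOccurtimeList[note] += 1
--
--     centroidNote = reduce(
--         lambda x, y: x+y[0]*y[1], enumerate(noteOccurtimeList), 0) // sum(noteOccurtimeList)
--     noteOnlyList = [x[1] for x in noteOnListWithoutEndTag]
--     return centroidNote, min(noteOnlyList), max(noteOnlyList)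
-- ===== SOURCE B (Python) =====
-- def analyzeNoteList(noteOnList):
--     body = noteOnList[:-1]
--     total = 0
--     lo = None
--     hi = None
--     for _, note in body:
--         total += note
--         if lo is None or note < lo:
--             lo = note
--         if hi is None or hi < note:
--             hi = note
--     centroid = total // len(body)
--     return centroid, lo, hi
-- ===== Notes on version B (the rewrite author's own statement) =====
-- stated objective: simpler
-- what changed: Dropped the 128-slot histogram and the enumerate/reduce weighted sum: B makes one direct pass over noteOnList[:-1] accumulating total, min and max, and returns (total // count, min, max).
-- outside the precondition, e.g. on analyzeNoteList([(0, -1), (0, 0)]): A returns (127, -1, -1), B returns (-1, -1, -1); on analyzeNoteList([(0, 128), (0, 0)]): A raises IndexError, B returns (128, 128, 128); on analyzeNoteList([(0, 60)]): A raises ZeroDivisionError, B raises ZeroDivisionError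
import Mathlib
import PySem

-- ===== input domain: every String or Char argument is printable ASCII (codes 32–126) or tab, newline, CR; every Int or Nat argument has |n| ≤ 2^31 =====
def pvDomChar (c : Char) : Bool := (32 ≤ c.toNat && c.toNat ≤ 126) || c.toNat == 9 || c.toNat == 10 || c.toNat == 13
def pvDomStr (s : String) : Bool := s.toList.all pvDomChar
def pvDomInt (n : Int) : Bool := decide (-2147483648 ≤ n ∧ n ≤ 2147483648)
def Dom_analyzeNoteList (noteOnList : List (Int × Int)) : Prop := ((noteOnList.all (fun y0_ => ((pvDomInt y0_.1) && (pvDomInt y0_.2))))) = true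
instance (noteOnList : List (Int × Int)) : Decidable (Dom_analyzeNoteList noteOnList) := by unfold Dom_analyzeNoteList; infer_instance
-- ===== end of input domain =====

-- B replaces A's 128-slot histogram + enumerate/reduce weighted sum by one direct pass
-- accumulating total, min and max (objective: simpler).

-- ===== PORT A =====
def analyzeNoteList (noteOnList : List (Int × Int)) : Int × Int × Int :=
  let noteOccurtimeList : List Int := List.replicate 128 0
  let noteOnListWithoutEndTag := PySem.List.slice noteOnList none (some (-1))
  -- for _, note in …: noteOccurtimeList[note] += 1  (Python raises IndexError for note
  -- outside [-128,128); there pyGetD/pySetD fall back, excluded by Pre_)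
  let hist := noteOnListWithoutEndTag.foldl
    (fun h p => PySem.List.pySetD h p.2 (PySem.List.pyGetD h p.2 0 + 1)) noteOccurtimeList
  -- reduce(lambda x, y: x+y[0]*y[1], enumerate(hist), 0) // sum(hist)
  -- (Python raises ZeroDivisionError when the body is empty; excluded by Pre_)
  let centroidNote := PySem.Int.floordiv
    ((PySem.List.enumerate hist 0).foldl (fun x y => x + y.1 * y.2) 0) hist.sum
  let noteOnlyList := noteOnListWithoutEndTag.map (fun x => x.2)
  -- min/max of the empty list raise in Python; unreachable under Pre_ (ZeroDivisionError first)
  (centroidNote, (PySem.List.min? noteOnlyList (fun x => x)).getD 0,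
   (PySem.List.max? noteOnlyList (fun x => x)).getD 0)

-- ===== PORT B =====
def analyzeNoteList_alt (noteOnList : List (Int × Int)) : Int × Int × Int :=
  let body := PySem.List.slice noteOnList none (some (-1))
  let st := body.foldl
    (fun (s : Int × Option Int × Option Int) p =>
      (s.1 + p.2,
       (match s.2.1 with | none => some p.2 | some l => if p.2 < l then some p.2 else some l),
       (match s.2.2 with | none => some p.2 | some h => if h < p.2 then some p.2 else some h)))
    (0, none, none)
  -- total // len(body): ZeroDivisionError on an empty body, excluded by Pre_
  (PySem.Int.floordiv st.1 (body.length : Int), st.2.1.getD 0, st.2.2.getD 0)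

-- ===== PRECONDITION & SPEC =====
-- Pre_ excludes: lists of length < 2 (both A and B raise ZeroDivisionError on the empty body);
-- bodies with a note ≥ 128 or < -128 (A raises IndexError); and bodies with a note in [-128,0)
-- — malformed MIDI notes outside the natural 0..127 note domain — where A returns a centroid
-- computed from negative-index wraparound into the histogram while B sums the notes directly.
def Pre_analyzeNoteList (noteOnList : List (Int × Int)) : Prop :=
  2 ≤ noteOnList.length ∧ ∀ p ∈ noteOnList.dropLast, 0 ≤ p.2 ∧ p.2 < 128
instance (noteOnList : List (Int × Int)) : Decidable (Pre_analyzeNoteList noteOnList) := by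
  unfold Pre_analyzeNoteList; infer_instance

def pvWitness_analyzeNoteList : (List (Int × Int)) := [(0, 60), (480, 64), (960, -1)]

def Spec_analyzeNoteList (noteOnList : List (Int × Int)) (out : Int × Int × Int) : Prop :=
  out = analyzeNoteList_alt noteOnList
instance (noteOnList : List (Int × Int)) (out : Int × Int × Int) :
    Decidable (Spec_analyzeNoteList noteOnList out) := by unfold Spec_analyzeNoteList; infer_instance

-- ===== CLAIM (what is proved, stated in full; the proofs are below) =====
def Claim_equal_analyzeNoteList : Prop :=
  ∀ (noteOnList : List (Int × Int)), Dom_analyzeNoteList noteOnList →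
    Pre_analyzeNoteList noteOnList →
    Spec_analyzeNoteList noteOnList (analyzeNoteList noteOnList)

-- ===== LEMMAS AND PROOFS =====

-- the weighted index sum A's reduce computes over the histogram (at enumerate offset s)
def pvWsumFrom (s : Int) (h : List Int) : Int :=
  ((PySem.List.enumerate h s).map (fun y => y.1 * y.2)).sum

theorem pvWsumFrom_set : ∀ (h : List Int) (n : Nat) (hn : n < h.length) (s v : Int),
    pvWsumFrom s (h.set n v) = pvWsumFrom s h + (s + (n : Int)) * (v - h[n])
  | [], n, hn, _, _ => by simp at hn
  | x :: t, 0, _, s, v => by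
      simp [pvWsumFrom, PySem.List.enumerate_cons]; ring
  | x :: t, n + 1, hn, s, v => by
      have hn' : n < t.length := by simpa using hn
      simp only [pvWsumFrom, List.set_cons_succ, PySem.List.enumerate_cons, List.map_cons,
        List.sum_cons, List.getElem_cons_succ]
      have := pvWsumFrom_set t n hn' (s + 1) v
      simp only [pvWsumFrom] at this
      rw [this]; push_cast; ring

theorem pvWsumFrom_replicate_zero : ∀ (n : Nat) (s : Int),
    pvWsumFrom s (List.replicate n (0 : Int)) = 0
  | 0, _ => by simp [pvWsumFrom]
  | n + 1, s => by
      simp only [pvWsumFrom, List.replicate_succ, PySem.List.enumerate_cons, List.map_cons,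
        List.sum_cons]
      have := pvWsumFrom_replicate_zero n (s + 1)
      simp only [pvWsumFrom] at this
      rw [this]; ring

theorem hist_invariant : ∀ (xs : List (Int × Int)) (h : List Int), h.length = 128 →
    (∀ p ∈ xs, 0 ≤ p.2 ∧ p.2 < 128) →
    pvWsumFrom 0 (xs.foldl (fun h p => PySem.List.pySetD h p.2 (PySem.List.pyGetD h p.2 0 + 1)) h)
        = pvWsumFrom 0 h + (xs.map (fun p => p.2)).sum ∧
      (xs.foldl (fun h p => PySem.List.pySetD h p.2 (PySem.List.pyGetD h p.2 0 + 1)) h).sum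
        = h.sum + xs.length
  | [], h, _, _ => by simp
  | p :: xs, h, hlen, hr => by
      have h0 : 0 ≤ p.2 := (hr p (by simp)).1
      have h1 : p.2 < 128 := (hr p (by simp)).2
      have hj : p.2.toNat < h.length := by omega
      have hgd : PySem.List.pyGetD h p.2 0 = h[p.2.toNat] := by
        apply PySem.List.pyGetD_eq_getElem
        · exact h0
        · simp only [hlen]; omega
      have hset : PySem.List.pySetD h p.2 (PySem.List.pyGetD h p.2 0 + 1)
          = h.set p.2.toNat (h[p.2.toNat] + 1) := by
        rw [hgd]
        apply PySem.List.pySetD_of_nonneg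
        exact h0
      have hw : pvWsumFrom 0 (h.set p.2.toNat (h[p.2.toNat] + 1)) = pvWsumFrom 0 h + p.2 := by
        rw [pvWsumFrom_set h p.2.toNat hj 0 _]
        have : ((p.2.toNat : Int)) = p.2 := Int.toNat_of_nonneg h0
        rw [this]; ring
      have hs : (h.set p.2.toNat (h[p.2.toNat] + 1)).sum = h.sum + 1 := by
        rw [List.sum_set']
        simp [hj]
      have ih := hist_invariant xs (h.set p.2.toNat (h[p.2.toNat] + 1))
        (by simp [hlen]) (fun q hq => hr q (by simp [hq]))
      simp only [List.foldl_cons, hset, List.map_cons, List.sum_cons, List.length_cons]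
      refine ⟨?_, ?_⟩
      · rw [ih.1, hw]; ring
      · rw [ih.2, hs]; push_cast; ring

theorem b_fold_invariant : ∀ (xs : List (Int × Int)) (a m M : Int),
    xs.foldl
      (fun (s : Int × Option Int × Option Int) p =>
        (s.1 + p.2,
         (match s.2.1 with | none => some p.2 | some l => if p.2 < l then some p.2 else some l),
         (match s.2.2 with | none => some p.2 | some h => if h < p.2 then some p.2 else some h)))
      (a, some m, some M)
      = (a + (xs.map (fun p => p.2)).sum,
         some ((xs.map (fun p => p.2)).foldl min m),
         some ((xs.map (fun p => p.2)).foldl max M))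
  | [], a, m, M => by simp
  | p :: xs, a, m, M => by
      simp only [List.foldl_cons, List.map_cons, List.sum_cons]
      have hmin : (if p.2 < m then some p.2 else some m) = some (min m p.2) := by
        split_ifs with h <;> congr 1 <;> omega
      have hmax : (if M < p.2 then some p.2 else some M) = some (max M p.2) := by
        split_ifs with h <;> congr 1 <;> omega
      rw [hmin, hmax, b_fold_invariant xs (a + p.2) (min m p.2) (max M p.2)]
      simp [add_assoc]

-- ===== VERDICT (by name: the statement is the Claim_ definition above) =====
theorem analyzeNoteList_spec : Claim_equal_analyzeNoteList := by
  intro l _ hPre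
  obtain ⟨hlen2, hrange⟩ := hPre
  unfold Spec_analyzeNoteList analyzeNoteList analyzeNoteList_alt
  simp only [PySem.List.slice_to_neg_one]
  have hbne : l.dropLast ≠ [] := by
    have : l.dropLast.length = l.length - 1 := List.length_dropLast
    intro hnil; rw [hnil] at this; simp at this; omega
  obtain ⟨q, t, hqt⟩ := List.exists_cons_of_ne_nil hbne
  have hinv := hist_invariant l.dropLast (List.replicate 128 0) (by simp) hrange
  -- A's reduce is the weighted sum pvWsumFrom 0
  have hfold : ∀ (h : List Int),
      (PySem.List.enumerate h 0).foldl (fun x y => x + y.1 * y.2) 0 = pvWsumFrom 0 h := by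
    intro h
    have := PySem.List.foldl_add (l := PySem.List.enumerate h 0)
      (g := fun (y : Int × Int) => y.1 * y.2) (a := 0)
    simpa [pvWsumFrom] using this
  rw [hfold]
  rw [hinv.1, hinv.2, pvWsumFrom_replicate_zero]
  simp only [List.sum_replicate, smul_zero, zero_add]
  -- B's single pass
  rw [hqt]
  simp only [List.foldl_cons]
  rw [show (((0 : Int) + q.2,
      (match (none : Option Int) with
        | none => some q.2 | some l => if q.2 < l then some q.2 else some l),
      (match (none : Option Int) with
        | none => some q.2 | some h => if h < q.2 then some q.2 else some h)))
      = ((q.2 : Int), some q.2, some q.2) by simp]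
  rw [b_fold_invariant t q.2 q.2 q.2]
  simp only [List.map_cons]
  rw [PySem.List.min?_id_cons, PySem.List.max?_id_cons]
  simp
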